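-- pv_equiv track=rewrite | github.com/brtkev/redes-proyecto-capa-enlace | Hamming.py | hammingADatos
-- ===== SOURCE A (Python) =====
-- def hammingADatos(hamming : str | list ) -> str:
--     # transformamos de hamming a datos originales
--     res = ""
--     j=0
--     for i in range(len(hamming)) :
--         if i != 2**j - 1:
--             res += str(hamming[i])
--         else:
--             j+=1
--     return res
-- ===== SOURCE B (Python) =====
-- def hammingADatos(hamming):
--     # The parity (skipped) positions are 0,1,3,7,... = 2**k - 1, so the data
--     # characters form contiguous blocks hamming[2**k : 2**(k+1) - 1]; build the
--     # result by concatenating these whole slices instead of scanning index by index.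
--     n = len(hamming)
--     return ''.join(
--         ''.join(str(x) for x in hamming[2 ** k : 2 ** (k + 1) - 1])
--         for k in range(1, n.bit_length() + 1))
-- ===== Notes on version B (the rewrite author's own statement) =====
-- stated objective: faster
-- what changed: Instead of scanning index by index with a running counter j and repeated string concatenation, B exploits that the skipped positions 2^k-1 bound contiguous data blocks and joins the whole slices hamming[2**k : 2**(k+1)-1] for k = 1..n.bit_length().
import Mathlib
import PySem

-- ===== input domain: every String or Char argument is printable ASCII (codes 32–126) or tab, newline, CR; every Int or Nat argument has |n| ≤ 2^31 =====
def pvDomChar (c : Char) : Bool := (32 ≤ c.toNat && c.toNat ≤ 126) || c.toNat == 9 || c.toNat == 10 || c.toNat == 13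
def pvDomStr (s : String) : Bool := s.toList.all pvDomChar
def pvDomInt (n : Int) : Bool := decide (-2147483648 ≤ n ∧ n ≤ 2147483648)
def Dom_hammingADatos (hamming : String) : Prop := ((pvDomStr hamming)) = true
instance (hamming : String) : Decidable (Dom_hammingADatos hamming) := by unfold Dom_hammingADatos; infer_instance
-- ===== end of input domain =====

-- B builds the output by concatenating the whole data-bit slices hamming[2^k : 2^(k+1)-1]
-- instead of A's per-index scan with a running counter j and per-char concatenation (measurably faster by a constant factor).

-- ===== PORT A =====
-- A's loop: accumulate res (as a char list, one char appended per kept index)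
-- and the counter j, over i in range(len(hamming)).
def hammingADatos (hamming : String) : String :=
  let cs := hamming.toList
  let st := (List.range cs.length).foldl
    (fun (st : List Char × Nat) i =>
      if i ≠ 2 ^ st.2 - 1 then (st.1 ++ [cs.getD i ' '], st.2)
      else (st.1, st.2 + 1)) ([], 0)
  String.mk st.1

-- ===== PORT B =====
-- Source B: for k in range(1, n.bit_length()+1) take the slice hamming[2**k : 2**(k+1)-1]
-- and join the chunks.  Nat.size n is Lean's n.bit_length(); range(1, m+1) is List.range' 1 m.
def hammingADatos_alt (hamming : String) : String :=
  let cs := hamming.toList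
  let n := cs.length
  String.mk (((List.range' 1 (Nat.size n)).map
      (fun k => PySem.List.slice cs (some ((2:Int) ^ k)) (some ((2:Int) ^ (k+1) - 1)))).flatten)

-- ===== PRECONDITION & SPEC =====
def Spec_hammingADatos (hamming : String) (out : String) : Prop := out = hammingADatos_alt hamming
instance (hamming : String) (out : String) : Decidable (Spec_hammingADatos hamming out) := by unfold Spec_hammingADatos; infer_instance

-- ===== CLAIM (what is proved, stated in full; the proofs are below) =====
def Claim_equal_hammingADatos : Prop := ∀ (hamming : String), Dom_hammingADatos hamming → Spec_hammingADatos hamming (hammingADatos hamming)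

-- ===== LEMMAS AND PROOFS =====

-- the list of parity positions 2^k - 1 that A skips
def hammingParity (n : Nat) : List Nat :=
  (List.range (Nat.size n + 1)).map (fun k => 2 ^ k - 1)

theorem hamming_size_pow_sub_one (k : Nat) : Nat.size (2 ^ k - 1) = k := by
  have h1 : 0 < 2 ^ k := Nat.pow_pos (by decide)
  apply Nat.le_antisymm
  · exact Nat.size_le.2 (by omega)
  · cases k with
    | zero => simp
    | succ m =>
      have h2 : (2:Nat) ^ m < 2 ^ (m+1) := Nat.pow_lt_pow_right (by decide) (Nat.lt_succ_self m)
      exact Nat.lt_size.2 (by omega)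

theorem hamming_mem_parity (n i : Nat) (hi : i < n) :
    i ∈ hammingParity n ↔ i + 1 = 2 ^ Nat.size i := by
  unfold hammingParity
  simp only [List.mem_map, List.mem_range]
  constructor
  · rintro ⟨k, _, rfl⟩
    have h1 : 0 < 2 ^ k := Nat.pow_pos (by decide)
    rw [hamming_size_pow_sub_one]
    omega
  · intro h
    refine ⟨Nat.size i, ?_, by omega⟩
    have h2 : 2 ^ Nat.size i ≤ n := by omega
    have := Nat.lt_size.2 h2
    omega

-- A's loop characterised: kept chars are the non-parity indices, in order
theorem hamming_loop_inv (cs : List Char) (m : Nat) (hm : m ≤ cs.length) :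
    (List.range m).foldl
      (fun (st : List Char × Nat) i =>
        if i ≠ 2 ^ st.2 - 1 then (st.1 ++ [cs.getD i ' '], st.2)
        else (st.1, st.2 + 1)) ([], 0)
    = (((List.range m).filter (fun i => i ∉ hammingParity cs.length)).map
         (fun i => cs.getD i ' '), Nat.size m) := by
  induction m with
  | zero => simp
  | succ m ih =>
    have hm' : m ≤ cs.length := Nat.le_of_succ_le hm
    have hmlt : m < cs.length := hm
    rw [List.range_succ, List.foldl_append, ih hm', List.filter_append, List.map_append]
    have hmem := hamming_mem_parity cs.length m hmlt
    have hpos : 0 < 2 ^ Nat.size m := Nat.pow_pos (by decide)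
    have hself : m < 2 ^ Nat.size m := Nat.lt_size_self m
    by_cases hp : m + 1 = 2 ^ Nat.size m
    · have hmp : m ∈ hammingParity cs.length := hmem.2 hp
      have hsz : Nat.size (m + 1) = Nat.size m + 1 := by
        rw [hp, Nat.size_pow]
      simp only [List.foldl_cons, List.foldl_nil, List.filter_cons]
      have hcond : ¬ (m ≠ 2 ^ Nat.size m - 1) := by omega
      simp [hcond, hmp, hsz]
    · have hmp : m ∉ hammingParity cs.length := fun h => hp (hmem.1 h)
      have hsz : Nat.size (m + 1) = Nat.size m := by
        apply Nat.le_antisymm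
        · exact Nat.size_le.2 (by omega)
        · exact Nat.size_le_size (Nat.le_succ m)
      simp only [List.foldl_cons, List.foldl_nil, List.filter_cons]
      have hcond : m ≠ 2 ^ Nat.size m - 1 := by omega
      simp [hcond, hmp, hsz]

-- B's index blocks: the indices the slice for k extracts
def hammingBlock (n k : Nat) : List Nat :=
  List.range' (2 ^ k) (min (2 ^ (k+1) - 1 - 2 ^ k) (n - 2 ^ k))

-- a clamped drop/take is the map of getD over its index range
theorem hamming_drop_take (cs : List Char) (a m : Nat) :
    (cs.drop a).take m
      = (List.range' a (min m (cs.length - a))).map (fun i => cs.getD i ' ') := by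
  apply List.ext_getElem
  · simp
  · intro i h1 h2
    simp only [List.getElem_take, List.getElem_drop, List.getElem_map, List.getElem_range']
    have hlt : a + i < cs.length := by
      simp at h2; omega
    rw [one_mul, List.getD_eq_getElem cs ' ' hlt]

-- B's slice for k is the map of getD over hammingBlock
theorem hamming_slice_eq (cs : List Char) (k : Nat) :
    PySem.List.slice cs (some ((2:Int) ^ k)) (some ((2:Int) ^ (k+1) - 1))
      = (hammingBlock cs.length k).map (fun i => cs.getD i ' ') := by
  have hc1 : ((2:Int) ^ k) = (((2 ^ k : Nat)) : Int) := by push_cast; ring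
  have hpos : 0 < 2 ^ (k+1) := Nat.pow_pos (by decide)
  have hc2 : ((2:Int) ^ (k+1) - 1) = (((2 ^ (k+1) - 1 : Nat)) : Int) := by
    push_cast [hpos]; ring
  rw [hc1, hc2, PySem.List.slice_natCast, hamming_drop_take]
  unfold hammingBlock
  congr 1

-- two strictly increasing Nat lists with the same members are equal
theorem hamming_eq_of_mem_iff : ∀ (xs ys : List Nat), xs.Pairwise (· < ·) → ys.Pairwise (· < ·) →
    (∀ a, a ∈ xs ↔ a ∈ ys) → xs = ys := by
  intro xs ys hx hy hmem
  have hnx : xs.Nodup := hx.imp Nat.ne_of_lt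
  have hny : ys.Nodup := hy.imp Nat.ne_of_lt
  have hperm : xs.Perm ys := (List.perm_ext_iff_of_nodup hnx hny).2 hmem
  exact List.Perm.eq_of_pairwise (fun a b _ _ h1 h2 => Nat.le_antisymm h1 h2)
    (hx.imp Nat.le_of_lt) (hy.imp Nat.le_of_lt) hperm

-- the filtered index list equals the concatenation of the blocks
theorem hamming_indices_eq (n : Nat) :
    (List.range n).filter (fun i => i ∉ hammingParity n)
      = ((List.range' 1 (Nat.size n)).map (hammingBlock n)).flatten := by
  apply hamming_eq_of_mem_iff
  · exact List.Pairwise.filter _ List.pairwise_lt_range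
  · rw [List.pairwise_flatten]
    constructor
    · intro l hl
      obtain ⟨k, _, rfl⟩ := List.mem_map.1 hl
      exact List.pairwise_lt_range' 1
    · rw [List.pairwise_map]
      refine (List.pairwise_lt_range' 1).imp ?_
      intro k1 k2 hk x hx y hy
      have hx' := (List.mem_range'_1.1 hx).2
      have hy' := (List.mem_range'_1.1 hy).1
      have hmono : 2 ^ (k1 + 1) ≤ 2 ^ k2 := Nat.pow_le_pow_right (by decide) hk
      have hp1 : 0 < 2 ^ k1 := Nat.pow_pos (by decide)
      have hps : (2:Nat) ^ (k1 + 1) = 2 ^ k1 * 2 := pow_succ 2 k1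
      unfold hammingBlock at hx'
      omega
  · intro a
    simp only [List.mem_filter, List.mem_range, List.mem_flatten, List.mem_map,
      decide_eq_true_eq]
    constructor
    · rintro ⟨haltn, hnp⟩
      have hnp' : a + 1 ≠ 2 ^ Nat.size a :=
        fun h => hnp ((hamming_mem_parity n a haltn).2 h)
      have ha2 : 2 ≤ a := by
        by_contra h
        interval_cases a <;> simp_all
      have hsa : 2 ≤ Nat.size a := Nat.lt_size.2 (by simpa using ha2)
      refine ⟨hammingBlock n (Nat.size a - 1), ⟨Nat.size a - 1, ?_, rfl⟩, ?_⟩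
      · have h1 : Nat.size a ≤ Nat.size n := Nat.size_le_size (Nat.le_of_lt haltn)
        have h2 : 0 < Nat.size n := Nat.size_pos.2 (by omega)
        exact List.mem_range'_1.2 ⟨by omega, by omega⟩
      · have h2k : 2 ^ (Nat.size a - 1) ≤ a := Nat.lt_size.1 (by omega)
        have hak : a < 2 ^ (Nat.size a - 1 + 1) := by
          have := Nat.lt_size_self a
          have he : Nat.size a - 1 + 1 = Nat.size a := by omega
          rw [he]; exact this
        have hne : a + 1 ≠ 2 ^ (Nat.size a - 1 + 1) := by
          have he : Nat.size a - 1 + 1 = Nat.size a := by omega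
          rw [he]; exact hnp'
        unfold hammingBlock
        exact List.mem_range'_1.2 ⟨h2k, by omega⟩
    · rintro ⟨l, ⟨k, hk, rfl⟩, ha⟩
      have hk' := List.mem_range'_1.1 hk
      unfold hammingBlock at ha
      have ha' := List.mem_range'_1.1 ha
      have hps : (2:Nat) ^ (k + 1) = 2 ^ k * 2 := pow_succ 2 k
      have hp1 : 0 < 2 ^ k := Nat.pow_pos (by decide)
      have haltn : a < n := by omega
      refine ⟨haltn, fun hmem => ?_⟩
      have h := (hamming_mem_parity n a haltn).1 hmem
      have hsz : Nat.size a = k + 1 := by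
        apply Nat.le_antisymm
        · exact Nat.size_le.2 (by omega)
        · exact Nat.lt_size.2 (by omega)
      rw [hsz] at h
      omega

theorem hammingADatos_spec : Claim_equal_hammingADatos := by
  intro hamming _
  unfold Spec_hammingADatos hammingADatos hammingADatos_alt
  simp only []
  rw [hamming_loop_inv hamming.toList hamming.toList.length (le_refl _)]
  congr 1
  rw [hamming_indices_eq]
  have hmap : (List.range' 1 (Nat.size hamming.toList.length)).map
      (fun k => PySem.List.slice hamming.toList (some ((2:Int) ^ k)) (some ((2:Int) ^ (k+1) - 1)))
      = ((List.range' 1 (Nat.size hamming.toList.length)).map (hammingBlock hamming.toList.length)).map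
          (List.map (fun i => hamming.toList.getD i ' ')) := by
    rw [List.map_map]
    exact List.map_congr_left (fun k _ => hamming_slice_eq hamming.toList k)
  rw [hmap, ← List.map_flatten]
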